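-- pv_equiv track=rewrite | github.com/zxjAiLun/keqing1 | src/replay/bot.py | _sort_hand
-- ===== SOURCE A (Python) =====
-- _TILE_ORDER = {
--     **{f"{n}m": n - 1 for n in range(1, 10)},
--     "5mr": 4,
--     **{f"{n}p": 9 + n - 1 for n in range(1, 10)},
--     "5pr": 13,
--     **{f"{n}s": 18 + n - 1 for n in range(1, 10)},
--     "5sr": 22,
--     "E": 27,
--     "S": 28,
--     "W": 29,
--     "N": 30,
--     "P": 31,
--     "F": 32,
--     "C": 33,
-- }
--
-- def _sort_hand(hand: list[str], tsumo_pai: str | None = None) -> list[str]: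
--     """排序手牌，tsumo_pai 放在最右边。"""
--     others = [t for t in hand if t != tsumo_pai or tsumo_pai is None]
--     if tsumo_pai and tsumo_pai in hand:
--         others = sorted(
--             [t for t in hand if t != tsumo_pai], key=lambda t: _TILE_ORDER.get(t, 99)
--         )
--         return others + [tsumo_pai]
--     return sorted(hand, key=lambda t: _TILE_ORDER.get(t, 99))
-- ===== SOURCE B (Python) =====
-- _ORDER = "1m 2m 3m 4m 5m 6m 7m 8m 9m 1p 2p 3p 4p 5p 6p 7p 8p 9p 1s 2s 3s 4s 5s 6s 7s 8s 9s E S W N P F C".split()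
--
--
-- def _slot(t):
--     """Bucket index 0..34 of a tile: position in _ORDER (red fives share their base five's slot), 34 = unknown."""
--     if t == "5mr":
--         t = "5m"
--     elif t == "5pr":
--         t = "5p"
--     elif t == "5sr":
--         t = "5s"
--     return _ORDER.index(t) if t in _ORDER else 34
--
--
-- def _sort_hand(hand, tsumo_pai=None):
--     """Stable bucket sort into 35 fixed slots instead of a comparison sort; tsumo tile appended last."""
--     has_tsumo = bool(tsumo_pai) and tsumo_pai in hand
--     rest = [t for t in hand if t != tsumo_pai] if has_tsumo else hand
--     buckets = [[] for _ in range(35)]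
--     for t in rest:
--         buckets[_slot(t)].append(t)
--     out = [t for b in buckets for t in b]
--     if has_tsumo:
--         out.append(tsumo_pai)
--     return out
-- ===== Notes on version B (the rewrite author's own statement) =====
-- stated objective: alternative
-- what changed: Replaces the key-based comparison sort with a stable bucket sort: tiles are appended in one pass into 35 fixed buckets (slot computed by position in a flat tile-order list, red fives normalised to their base five, unknown tiles to slot 34) and the buckets are concatenated; the tsumo tile is excluded while scanning and appended once at the end.
import Mathlib
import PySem

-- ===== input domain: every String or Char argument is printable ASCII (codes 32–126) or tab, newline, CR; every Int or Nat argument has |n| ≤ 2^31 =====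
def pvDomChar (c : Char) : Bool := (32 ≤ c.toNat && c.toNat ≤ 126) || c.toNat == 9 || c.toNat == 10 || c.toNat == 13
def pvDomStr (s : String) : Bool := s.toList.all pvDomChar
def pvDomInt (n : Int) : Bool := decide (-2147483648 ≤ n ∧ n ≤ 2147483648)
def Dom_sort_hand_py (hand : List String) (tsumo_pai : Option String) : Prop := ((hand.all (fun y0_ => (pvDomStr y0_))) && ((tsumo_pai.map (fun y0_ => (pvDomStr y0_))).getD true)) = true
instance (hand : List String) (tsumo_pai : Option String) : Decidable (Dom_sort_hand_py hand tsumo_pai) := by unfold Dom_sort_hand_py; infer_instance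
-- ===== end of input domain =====

-- B replaces the key-based comparison sort with a stable bucket sort into 35 fixed slots
-- (slot = position in a flat tile-order list; red fives share their base five's slot; unknown → 34).

-- ===== PORT A =====
-- _TILE_ORDER, a module-level dict literal (all keys distinct)
def pvPairs : List (String × Int) :=
  [("1m", 0), ("2m", 1), ("3m", 2), ("4m", 3), ("5m", 4), ("6m", 5), ("7m", 6), ("8m", 7), ("9m", 8),
   ("5mr", 4),
   ("1p", 9), ("2p", 10), ("3p", 11), ("4p", 12), ("5p", 13), ("6p", 14), ("7p", 15), ("8p", 16), ("9p", 17),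
   ("5pr", 13),
   ("1s", 18), ("2s", 19), ("3s", 20), ("4s", 21), ("5s", 22), ("6s", 23), ("7s", 24), ("8s", 25), ("9s", 26),
   ("5sr", 22),
   ("E", 27), ("S", 28), ("W", 29), ("N", 30), ("P", 31), ("F", 32), ("C", 33)]

def pvTileOrder : PySem.Dict String Int := PySem.Dict.ofList pvPairs

-- _TILE_ORDER.get(t, 99), A's sort key
def pvKey (t : String) : Int := PySem.Dict.getD pvTileOrder t 99

def sort_hand_py (hand : List String) (tsumo_pai : Option String) : List String :=
  -- others = [t for t in hand if t != tsumo_pai or tsumo_pai is None]  (dead in every path, as in A)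
  let _others := hand.filter (fun t => decide (some t ≠ tsumo_pai) || decide (tsumo_pai = none))
  match tsumo_pai with
  | some tp =>
      if tp ≠ "" ∧ tp ∈ hand then
        PySem.List.sorted (hand.filter (fun t => decide (t ≠ tp))) pvKey ++ [tp]
      else
        PySem.List.sorted hand pvKey
  | none => PySem.List.sorted hand pvKey

-- ===== PORT B =====
-- _ORDER = "...".split()
def pvOrder : List String :=
  PySem.Str.split₀ "1m 2m 3m 4m 5m 6m 7m 8m 9m 1p 2p 3p 4p 5p 6p 7p 8p 9p 1s 2s 3s 4s 5s 6s 7s 8s 9s E S W N P F C"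

-- _slot(t): red fives renamed to their base five, then _ORDER.index(t) if present, else 34
def pvSlot (t : String) : Nat :=
  let base := if t = "5mr" then "5m" else if t = "5pr" then "5p" else if t = "5sr" then "5s" else t
  match PySem.List.index? pvOrder base with
  | some i => i
  | none => 34

def sort_hand_py_alt (hand : List String) (tsumo_pai : Option String) : List String :=
  let has_tsumo : Bool :=
    match tsumo_pai with
    | some tp => decide (tp ≠ "") && decide (tp ∈ hand)
    | none => false
  let rest := if has_tsumo then hand.filter (fun t => decide (some t ≠ tsumo_pai)) else hand
  let buckets := rest.foldl (fun bs t => bs.modify (pvSlot t) (· ++ [t])) (List.replicate 35 ([] : List String))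
  let out := buckets.flatten
  if has_tsumo then out ++ tsumo_pai.toList else out

-- ===== PRECONDITION & SPEC =====
def Spec_sort_hand_py (hand : List String) (tsumo_pai : Option String) (out : List String) : Prop := out = sort_hand_py_alt hand tsumo_pai
instance (hand : List String) (tsumo_pai : Option String) (out : List String) : Decidable (Spec_sort_hand_py hand tsumo_pai out) := by unfold Spec_sort_hand_py; infer_instance

-- ===== CLAIM (what is proved, stated in full; the proofs are below) =====
def Claim_equal_sort_hand_py : Prop := ∀ (hand : List String) (tsumo_pai : Option String), Dom_sort_hand_py hand tsumo_pai → Spec_sort_hand_py hand tsumo_pai (sort_hand_py hand tsumo_pai)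

-- ===== LEMMAS AND PROOFS =====

-- the Int key that slot i stands for
def pvKeyOf (i : Nat) : Int := if i < 34 then (i : Int) else 99

def pvAllKeys : List String :=
  ["5mr", "5pr", "5sr",
   "1m", "2m", "3m", "4m", "5m", "6m", "7m", "8m", "9m",
   "1p", "2p", "3p", "4p", "5p", "6p", "7p", "8p", "9p",
   "1s", "2s", "3s", "4s", "5s", "6s", "7s", "8s", "9s",
   "E", "S", "W", "N", "P", "F", "C"]

lemma insertBy_append_skip {α : Type} (before : α → α → Bool) (x : α) (L R : List α)
    (h : ∀ y ∈ L, before x y = false) :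
    PySem.List.insertBy before x (L ++ R) = L ++ PySem.List.insertBy before x R := by
  induction L with
  | nil => simp
  | cons a L ih =>
    have ha := h a (by simp)
    simp [PySem.List.insertBy, ha, ih (fun y hy => h y (List.mem_cons_of_mem _ hy))]

lemma insertBy_all_before {α : Type} (before : α → α → Bool) (x : α) (R : List α)
    (h : ∀ y ∈ R, before x y = true) :
    PySem.List.insertBy before x R = x :: R := by
  cases R with
  | nil => simp [PySem.List.insertBy]
  | cons a R =>
    have ha : before x a = true := h a (by simp)
    simp [PySem.List.insertBy, ha]

lemma insertBy_flatMap {α : Type} (key : α → Int) (x : α) (ks : List Int) (xs : List α)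
    (hks : ks.Pairwise (· < ·)) (hx : key x ∈ ks) :
    PySem.List.insertBy (fun a b => decide (key a < key b)) x
        (ks.flatMap (fun k => xs.filter (fun y => decide (key y = k)))) =
      ks.flatMap (fun k => (xs ++ [x]).filter (fun y => decide (key y = k))) := by
  induction ks with
  | nil => cases hx
  | cons k ks ih =>
    rw [List.pairwise_cons] at hks
    simp only [List.flatMap_cons]
    by_cases hk : key x = k
    · rw [insertBy_append_skip]
      · rw [insertBy_all_before]
        · have h1 : (xs ++ [x]).filter (fun y => decide (key y = k)) =
              xs.filter (fun y => decide (key y = k)) ++ [x] := by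
            rw [List.filter_append]; simp [hk]
          have h2 : ks.flatMap (fun k' => (xs ++ [x]).filter (fun y => decide (key y = k'))) =
              ks.flatMap (fun k' => xs.filter (fun y => decide (key y = k'))) := by
            apply List.flatMap_congr
            intro k' hk'
            rw [List.filter_append]
            have : ¬ (key x = k') := by
              have := hks.1 k' hk'; omega
            simp [this]
          rw [h1, h2]; simp
        · intro y hy
          simp only [List.mem_flatMap, List.mem_filter] at hy
          obtain ⟨k', hk', _, hkey⟩ := hy
          have hky : key y = k' := by simpa using hkey
          have : key x < key y := by rw [hk, hky]; exact hks.1 k' hk'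
          simpa using this
      · intro y hy
        simp only [List.mem_filter] at hy
        have hky : key y = k := by simpa using hy.2
        have : ¬ (key x < key y) := by rw [hk, hky]; omega
        simpa using this
    · have hx' : key x ∈ ks := by
        rcases List.mem_cons.mp hx with h | h
        · exact absurd h hk
        · exact h
      have hlt : k < key x := hks.1 _ hx'
      rw [insertBy_append_skip]
      · rw [ih hks.2 hx']
        have h1 : (xs ++ [x]).filter (fun y => decide (key y = k)) =
            xs.filter (fun y => decide (key y = k)) := by
          rw [List.filter_append]; simp [hk]
        rw [h1]
      · intro y hy
        simp only [List.mem_filter] at hy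
        have hky : key y = k := by simpa using hy.2
        have : ¬ (key x < key y) := by rw [hky]; omega
        simpa using this

-- Python's stable sort over keys drawn from a fixed strictly increasing key list equals
-- the concatenation of the per-key buckets (the heart of A = B).
lemma sorted_eq_flatMap {α : Type} (key : α → Int) (ks : List Int)
    (hks : ks.Pairwise (· < ·)) (xs : List α) (hall : ∀ x ∈ xs, key x ∈ ks) :
    PySem.List.sorted xs key =
      ks.flatMap (fun k => xs.filter (fun y => decide (key y = k))) := by
  rw [PySem.List.sorted_eq_foldl_insertBy]
  induction xs using List.reverseRecOn with
  | nil => simp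
  | append_singleton ys x ih =>
    rw [List.foldl_append]
    simp only [List.foldl_cons, List.foldl_nil]
    rw [ih (fun y hy => hall y (by simp [hy]))]
    exact insertBy_flatMap key x ks ys hks (hall x (by simp))

set_option maxRecDepth 40000 in
lemma pvTileOrder_keys : pvTileOrder.keys =
    ["1m", "2m", "3m", "4m", "5m", "6m", "7m", "8m", "9m", "5mr",
     "1p", "2p", "3p", "4p", "5p", "6p", "7p", "8p", "9p", "5pr",
     "1s", "2s", "3s", "4s", "5s", "6s", "7s", "8s", "9s", "5sr",
     "E", "S", "W", "N", "P", "F", "C"] := by decide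

set_option maxRecDepth 40000 in
lemma pvAllKeys_bridge : ∀ x ∈ pvAllKeys, pvKey x = pvKeyOf (pvSlot x) := by decide

set_option maxRecDepth 10000 in
lemma pvOrder_sub : ∀ x ∈ pvOrder, x ∈ pvAllKeys := by decide

lemma pvKeys_sub : ∀ x ∈ pvTileOrder.keys, x ∈ pvAllKeys := by
  rw [pvTileOrder_keys]; decide

-- the pointwise bridge between A's key and B's slot
lemma key_eq_keyOf_slot (t : String) : pvKey t = pvKeyOf (pvSlot t) := by
  by_cases ht : t ∈ pvAllKeys
  · exact pvAllKeys_bridge t ht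
  · have h1 : t ≠ "5mr" := fun h => ht (h ▸ (by decide))
    have h2 : t ≠ "5pr" := fun h => ht (h ▸ (by decide))
    have h3 : t ≠ "5sr" := fun h => ht (h ▸ (by decide))
    have hord : t ∉ pvOrder := fun h => ht (pvOrder_sub t h)
    have hslot : pvSlot t = 34 := by
      unfold pvSlot
      simp only [h1, h2, h3, if_false]
      rw [(PySem.List.index?_eq_none_iff pvOrder t).mpr hord]
    have hkeys : t ∉ pvTileOrder.keys := fun h => ht (pvKeys_sub t h)
    have hkey : pvKey t = 99 := by
      unfold pvKey
      exact PySem.Dict.getD_of_not_contains _ _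
        (by rw [PySem.Dict.contains_eq_decide_mem_keys]; simpa using hkeys)
    rw [hkey, hslot]; rfl

lemma pvSlot_lt (t : String) : pvSlot t < 35 := by
  unfold pvSlot
  cases h : PySem.List.index? pvOrder (if t = "5mr" then "5m" else if t = "5pr" then "5p" else if t = "5sr" then "5s" else t) with
  | none => simp only [h]; omega
  | some i =>
    obtain ⟨hk, -⟩ := PySem.List.getElem_of_index?_eq_some h
    have hlen : pvOrder.length = 34 := by decide
    simp only [h]
    omega

lemma pvKeyOf_inj {i j : Nat} (hi : i < 35) (hj : j < 35) (h : pvKeyOf i = pvKeyOf j) : i = j := by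
  unfold pvKeyOf at h
  split_ifs at h <;> omega

-- the bucket-fill loop: bucket i collects exactly the tiles with slot i, in order
lemma fill_length (xs : List String) (bs : List (List String)) :
    (xs.foldl (fun bs t => bs.modify (pvSlot t) (· ++ [t])) bs).length = bs.length := by
  induction xs generalizing bs with
  | nil => rfl
  | cons x xs ih => simp [List.foldl_cons, ih, List.length_modify]

lemma fill_getElem (xs : List String) (bs : List (List String)) (i : Nat) (hi : i < bs.length) :
    (xs.foldl (fun bs t => bs.modify (pvSlot t) (· ++ [t])) bs)[i]'(by rw [fill_length]; exact hi) =
      bs[i] ++ xs.filter (fun t => decide (pvSlot t = i)) := by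
  induction xs generalizing bs with
  | nil => simp
  | cons x xs ih =>
    simp only [List.foldl_cons]
    rw [ih (bs.modify (pvSlot x) (· ++ [x])) (by rw [List.length_modify]; exact hi)]
    rw [List.getElem_modify]
    by_cases hx : pvSlot x = i
    · simp [hx]
    · simp [hx]

lemma fill_eq (xs : List String) :
    xs.foldl (fun bs t => bs.modify (pvSlot t) (· ++ [t])) (List.replicate 35 ([] : List String)) =
      (List.range 35).map (fun i => xs.filter (fun t => decide (pvSlot t = i))) := by
  apply List.ext_getElem
  · rw [fill_length]; simp
  · intro i hi hi'
    have hi35 : i < 35 := by simpa using hi'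
    rw [fill_getElem xs _ i (by simpa using hi35), List.getElem_replicate]
    simp

-- B's flattened buckets equal A's stable sort
lemma flatten_fill_eq_sorted (xs : List String) :
    (xs.foldl (fun bs t => bs.modify (pvSlot t) (· ++ [t])) (List.replicate 35 ([] : List String))).flatten =
      PySem.List.sorted xs pvKey := by
  rw [fill_eq, ← List.flatMap_def]
  rw [sorted_eq_flatMap pvKey ((List.range 35).map pvKeyOf)
    (by decide)
    xs
    (fun x _ => by
      refine List.mem_map.mpr ⟨pvSlot x, ?_, (key_eq_keyOf_slot x).symm⟩
      simpa using pvSlot_lt x)]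
  rw [List.flatMap_map]
  apply List.flatMap_congr
  intro i hi
  apply List.filter_congr
  intro t _
  rw [key_eq_keyOf_slot t]
  by_cases h : pvSlot t = i
  · simp [h]
  · have : pvKeyOf (pvSlot t) ≠ pvKeyOf i :=
      fun hk => h (pvKeyOf_inj (pvSlot_lt t) (by simpa using hi) hk)
    simp [h, this]

-- ===== VERDICT (by name: the statement is the Claim_ definition above) =====
theorem sort_hand_py_spec : Claim_equal_sort_hand_py := by
  intro hand tsumo _
  unfold Spec_sort_hand_py sort_hand_py sort_hand_py_alt
  cases tsumo with
  | none =>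
    simp only [Bool.false_eq_true, if_false]
    rw [flatten_fill_eq_sorted]
  | some tp =>
    by_cases h : tp ≠ "" ∧ tp ∈ hand
    · have hb : (decide (tp ≠ "") && decide (tp ∈ hand)) = true := by
        simp [h.1, h.2]
      simp only [hb, if_pos h, if_true, Option.toList_some]
      rw [flatten_fill_eq_sorted]
      simp
    · have hb : (decide (tp ≠ "") && decide (tp ∈ hand)) = false := by
        by_cases h1 : tp = ""
        · simp [h1]
        · have h2 : tp ∉ hand := by tauto
          simp [h2]
      simp only [hb, if_neg h, Bool.false_eq_true, if_false]
      rw [flatten_fill_eq_sorted]
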